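-- pv_equiv track=rewrite | github.com/Hruthik07/shopping-assistant | src/agent/shopping_agent.py | _parse_prompt_blocks
-- ===== SOURCE A (Python) =====
-- from typing import Dict, Any, List, Optional, AsyncIterator, Tuple
--
-- def _parse_prompt_blocks(text: str) -> Tuple[str, Dict[str, str], Dict[str, str]]:
--     """Parse a single prompt file containing @@BASE, @@PERSONA <name>, @@TONE <name> blocks."""
--     base_lines: List[str] = []
--     personas: Dict[str, List[str]] = {}
--     tones: Dict[str, List[str]] = {}
--
--     current_section: Optional[str] = None  # "base" | "persona" | "tone"
--     current_key: Optional[str] = None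
--
--     for raw_line in (text or "").splitlines():
--         line = raw_line.rstrip("\n")
--         marker = line.strip()
--         if marker == "@@BASE":
--             current_section, current_key = "base", None
--             continue
--         if marker.lower().startswith("@@persona "):
--             current_section = "persona"
--             current_key = marker.split(" ", 1)[1].strip().lower()
--             personas.setdefault(current_key, [])
--             continue
--         if marker.lower().startswith("@@tone "):
--             current_section = "tone"
--             current_key = marker.split(" ", 1)[1].strip().lower()
--             tones.setdefault(current_key, [])
--             continue
--
--         if current_section == "base":
--             base_lines.append(line)
--         elif current_section == "persona" and current_key:
--             personas[current_key].append(line)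
--         elif current_section == "tone" and current_key:
--             tones[current_key].append(line)
--         else:
--             # If the file is a plain prompt without markers, treat as base.
--             base_lines.append(line)
--
--     base_prompt = "\n".join(base_lines).strip()
--     persona_map = {k: "\n".join(v).strip() for k, v in personas.items() if "\n".join(v).strip()}
--     tone_map = {k: "\n".join(v).strip() for k, v in tones.items() if "\n".join(v).strip()}
--     return base_prompt, persona_map, tone_map
-- ===== SOURCE B (Python) =====
-- def _parse_prompt_blocks(text):
--     """Two-pass: first segment the line stream at marker lines, then fold the
--     segments into the base prompt and the persona/tone maps."""
--     # pass 1: split the lines into tagged segments; lines before any marker form a base segment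
--     segments = [("base", "", [])]
--     for raw_line in (text or "").splitlines():
--         line = raw_line.rstrip("\n")
--         marker = line.strip()
--         if marker == "@@BASE":
--             segments.append(("base", "", []))
--         elif marker.lower().startswith("@@persona "):
--             segments.append(("persona", marker.split(" ", 1)[1].strip().lower(), []))
--         elif marker.lower().startswith("@@tone "):
--             segments.append(("tone", marker.split(" ", 1)[1].strip().lower(), []))
--         else:
--             segments[-1][2].append(line)
--     # pass 2: fold the segments, keeping first-appearance order of persona/tone names
--     base_lines = []
--     personas = {}
--     tones = {}
--     for tag, key, lines in segments:
--         if tag == "base":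
--             base_lines.extend(lines)
--         elif tag == "persona":
--             personas.setdefault(key, []).extend(lines)
--         else:
--             tones.setdefault(key, []).extend(lines)
--     base_prompt = "\n".join(base_lines).strip()
--     persona_map = {k: "\n".join(v).strip() for k, v in personas.items() if "\n".join(v).strip()}
--     tone_map = {k: "\n".join(v).strip() for k, v in tones.items() if "\n".join(v).strip()}
--     return base_prompt, persona_map, tone_map
-- ===== Notes on version B (the rewrite author's own statement) =====
-- stated objective: alternative
-- what changed: A's single-pass mutable state machine (current_section/current_key steering three accumulators line by line) is replaced by a two-pass decomposition: pass 1 splits the line stream into tagged segments at marker lines, pass 2 folds the segment list into the base lines and the persona/tone maps via setdefault+extend, with the same final join/strip/drop-empty step.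
import Mathlib
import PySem

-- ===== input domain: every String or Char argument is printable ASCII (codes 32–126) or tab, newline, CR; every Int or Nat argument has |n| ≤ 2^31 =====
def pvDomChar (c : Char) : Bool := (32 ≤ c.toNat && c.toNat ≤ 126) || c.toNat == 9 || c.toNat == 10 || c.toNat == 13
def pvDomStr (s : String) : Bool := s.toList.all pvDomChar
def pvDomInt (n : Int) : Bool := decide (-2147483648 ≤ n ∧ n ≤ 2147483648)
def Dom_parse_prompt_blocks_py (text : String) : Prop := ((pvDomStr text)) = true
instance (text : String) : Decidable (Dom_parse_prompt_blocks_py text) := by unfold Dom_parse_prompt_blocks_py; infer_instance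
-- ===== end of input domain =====

-- B re-parses the prompt in two passes (segment list, then a fold into the maps) instead of A's
-- one-pass mutable state machine; same cost, alternative decomposition; return values proved equal.

-- ===== PORT A =====
-- raw_line.rstrip("\n"): drop trailing '\n' characters only (exact hand port of rstrip with a char set)
def pvRstripNl (s : String) : String :=
  String.ofList ((s.toList.reverse.dropWhile (fun c => c == '\n')).reverse)

-- marker.split(" ", 1)[1]; both callers guard with startswith("@@… "), so index 1 exists
def pvSplit1Tail (m : String) : String :=
  ((PySem.Str.splitMax? m " " 1).getD []).getD 1 ""

-- "\n".join(lines).strip()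
def pvJoinStrip (ls : List String) : String := PySem.Str.strip (PySem.Str.join "\n" ls)

-- the three final comprehensions shared verbatim by A and B:
-- {k: "\n".join(v).strip() for k, v in d.items() if "\n".join(v).strip()}
def pvFinalize (st : List String × PySem.Dict String (List String) × PySem.Dict String (List String)) :
    String × (List (String × String)) × (List (String × String)) :=
  (pvJoinStrip st.1,
   (st.2.1.items.map (fun kv => (kv.1, pvJoinStrip kv.2))).filter (fun kv => !(kv.2 == "")),
   (st.2.2.items.map (fun kv => (kv.1, pvJoinStrip kv.2))).filter (fun kv => !(kv.2 == "")))

-- A's loop body; state = (base_lines, personas, tones, current_section, current_key)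
def pvStepA (st : List String × PySem.Dict String (List String) × PySem.Dict String (List String) × Option String × Option String)
    (rawLine : String) :
    List String × PySem.Dict String (List String) × PySem.Dict String (List String) × Option String × Option String :=
  let line := pvRstripNl rawLine
  let marker := PySem.Str.strip line
  if marker == "@@BASE" then (st.1, st.2.1, st.2.2.1, some "base", none)
  else if PySem.Str.startswith (PySem.Str.lower marker) "@@persona " then
    let key := PySem.Str.lower (PySem.Str.strip (pvSplit1Tail marker))
    (st.1, st.2.1.setdefault key [], st.2.2.1, some "persona", some key)
  else if PySem.Str.startswith (PySem.Str.lower marker) "@@tone " then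
    let key := PySem.Str.lower (PySem.Str.strip (pvSplit1Tail marker))
    (st.1, st.2.1, st.2.2.1.setdefault key [], some "tone", some key)
  else if st.2.2.2.1 == some "base" then (st.1 ++ [line], st.2.1, st.2.2.1, st.2.2.2.1, st.2.2.2.2)
  else if st.2.2.2.1 == some "persona" && !(st.2.2.2.2 == none) && !(st.2.2.2.2 == some "") then
    -- personas[current_key].append(line): current_key was setdefault'ed at its marker, so it is present
    (st.1, st.2.1.modify (st.2.2.2.2.getD "") [] (· ++ [line]), st.2.2.1, st.2.2.2.1, st.2.2.2.2)
  else if st.2.2.2.1 == some "tone" && !(st.2.2.2.2 == none) && !(st.2.2.2.2 == some "") then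
    (st.1, st.2.1, st.2.2.1.modify (st.2.2.2.2.getD "") [] (· ++ [line]), st.2.2.2.1, st.2.2.2.2)
  else (st.1 ++ [line], st.2.1, st.2.2.1, st.2.2.2.1, st.2.2.2.2)

def parse_prompt_blocks_py (text : String) : String × (List (String × String)) × (List (String × String)) :=
  -- (text or "") is text itself: the only falsy str is "" and "" or "" == ""
  let st := (PySem.Str.splitlines text).foldl pvStepA ([], PySem.Dict.mk [], PySem.Dict.mk [], none, none)
  pvFinalize (st.1, st.2.1, st.2.2.1)

-- ===== PORT B =====
-- pass 1: segments[-1] is carried as `cur`; a marker line closes it and opens a new tagged segment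
def pvPass1 (lines : List String) (cur : String × String × List String)
    (done : List (String × String × List String)) : List (String × String × List String) :=
  match lines with
  | [] => done ++ [cur]
  | raw :: rest =>
    let line := pvRstripNl raw
    let marker := PySem.Str.strip line
    if marker == "@@BASE" then pvPass1 rest ("base", "", []) (done ++ [cur])
    else if PySem.Str.startswith (PySem.Str.lower marker) "@@persona " then
      pvPass1 rest ("persona", PySem.Str.lower (PySem.Str.strip (pvSplit1Tail marker)), []) (done ++ [cur])
    else if PySem.Str.startswith (PySem.Str.lower marker) "@@tone " then
      pvPass1 rest ("tone", PySem.Str.lower (PySem.Str.strip (pvSplit1Tail marker)), []) (done ++ [cur])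
    else pvPass1 rest (cur.1, cur.2.1, cur.2.2 ++ [line]) done

-- pass 2 body: d.setdefault(key, []).extend(lines), i.e. d[key] = d.get(key, []) + lines = Dict.modify
def pvSegStep (st : List String × PySem.Dict String (List String) × PySem.Dict String (List String))
    (seg : String × String × List String) :
    List String × PySem.Dict String (List String) × PySem.Dict String (List String) :=
  if seg.1 == "base" then (st.1 ++ seg.2.2, st.2.1, st.2.2)
  else if seg.1 == "persona" then (st.1, st.2.1.modify seg.2.1 [] (· ++ seg.2.2), st.2.2)
  else (st.1, st.2.1, st.2.2.modify seg.2.1 [] (· ++ seg.2.2))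

def parse_prompt_blocks_py_alt (text : String) : String × (List (String × String)) × (List (String × String)) :=
  pvFinalize ((pvPass1 (PySem.Str.splitlines text) ("base", "", []) []).foldl pvSegStep
    ([], PySem.Dict.mk [], PySem.Dict.mk []))

-- ===== PRECONDITION & SPEC =====
def Spec_parse_prompt_blocks_py (text : String) (out : String × (List (String × String)) × (List (String × String))) : Prop := out = parse_prompt_blocks_py_alt text
instance (text : String) (out : String × (List (String × String)) × (List (String × String))) : Decidable (Spec_parse_prompt_blocks_py text out) := by unfold Spec_parse_prompt_blocks_py; infer_instance

-- ===== CLAIM (what is proved, stated in full; the proofs are below) =====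
def Claim_equal_parse_prompt_blocks_py : Prop := ∀ (text : String), Dom_parse_prompt_blocks_py text → Spec_parse_prompt_blocks_py text (parse_prompt_blocks_py text)

-- ===== LEMMAS AND PROOFS =====

-- B's pass-2 fold from the empty state
def pvP2 (ss : List (String × String × List String)) :
    List String × PySem.Dict String (List String) × PySem.Dict String (List String) :=
  ss.foldl pvSegStep ([], PySem.Dict.mk [], PySem.Dict.mk [])

def pvDrop (st : List String × PySem.Dict String (List String) × PySem.Dict String (List String) × Option String × Option String) :
    List String × PySem.Dict String (List String) × PySem.Dict String (List String) :=
  (st.1, st.2.1, st.2.2.1)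

def pvJoin3 (st : List String × PySem.Dict String (List String) × PySem.Dict String (List String))
    (sec key : Option String) :
    List String × PySem.Dict String (List String) × PySem.Dict String (List String) × Option String × Option String :=
  (st.1, st.2.1, st.2.2, sec, key)

-- correspondence between B's current segment and A's (current_section, current_key)
def pvRel (cur : String × String × List String) (sec key : Option String) : Prop :=
  (cur.1 = "base" ∧ key = none ∧ (sec = none ∨ sec = some "base"))
  ∨ (cur.1 = "persona" ∧ sec = some "persona" ∧ key = some cur.2.1 ∧ cur.2.1 ≠ "")
  ∨ (cur.1 = "tone" ∧ sec = some "tone" ∧ key = some cur.2.1 ∧ cur.2.1 ≠ "")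

lemma pvInsertGetDSelf (d : PySem.Dict String (List String)) (k : String) (dflt : List String)
    (hn : d.keys.Nodup) (hc : d.contains k = true) : d.insert k (d.getD k dflt) = d := by
  obtain ⟨l⟩ := d
  simp only [PySem.Dict.insert, hc, if_pos]
  apply PySem.Dict.ext
  simp only [PySem.Dict.getD, PySem.Dict.get?]
  simp only [PySem.Dict.keys, PySem.Dict.contains] at hn hc
  induction l with
  | nil => simp at hc
  | cons p l ih =>
    simp only [List.map_cons, List.nodup_cons] at hn
    by_cases hp : p.1 == k
    · have hk : p.1 = k := eq_of_beq hp
      simp only [List.find?_cons, hp, List.map_cons, if_pos, Option.map_some, Option.getD_some,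
        List.cons.injEq]
      refine ⟨by rw [← hk], ?_⟩
      rw [List.map_congr_left (f := fun p_1 => if (p_1.1 == k) = true then (k, p.2) else p_1)
        (g := id) ?_, List.map_id]
      intro q hq
      have hqk : ¬ (q.1 == k) = true := by
        simp only [beq_iff_eq]
        intro e
        exact hn.1 (hk ▸ e ▸ List.mem_map_of_mem hq)
      simp [hqk]
    · simp only [List.find?_cons, hp, List.map_cons]
      simp only [List.any_cons, hp, Bool.false_or] at hc
      have := ih hn.2 hc
      simp only [Bool.false_eq_true, if_false, this]

lemma pvModifyNilSetdefault (d : PySem.Dict String (List String)) (k : String)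
    (hn : d.keys.Nodup) : d.modify k [] (· ++ []) = d.setdefault k [] := by
  by_cases hc : d.contains k
  · rw [PySem.Dict.setdefault_of_contains d [] hc]
    have e : d.modify k [] (· ++ []) = d.insert k (d.getD k []) := by
      simp [PySem.Dict.modify]
    rw [e, pvInsertGetDSelf d k [] hn hc]
  · have hc' : d.contains k = false := by simpa using hc
    rw [PySem.Dict.setdefault_of_not_contains d [] hc']
    have h0 : d.getD k [] = [] := by
      simp [PySem.Dict.getD, (PySem.Dict.get?_eq_none_iff_contains d k).2 hc']
    simp [PySem.Dict.modify, h0]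

lemma pvModifyModify (d : PySem.Dict String (List String)) (k : String)
    (f g : List String → List String) :
    (d.modify k [] f).modify k [] g = d.modify k [] (fun v => g (f v)) := by
  simp only [PySem.Dict.modify, PySem.Dict.getD_insert_self, PySem.Dict.insert_insert_self]

lemma pvNodupKeysP2Aux (ss : List (String × String × List String)) :
    ∀ st : List String × PySem.Dict String (List String) × PySem.Dict String (List String),
      st.2.1.keys.Nodup → st.2.2.keys.Nodup →
      (ss.foldl pvSegStep st).2.1.keys.Nodup ∧ (ss.foldl pvSegStep st).2.2.keys.Nodup := by
  induction ss with
  | nil => intro st h1 h2; exact ⟨h1, h2⟩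
  | cons seg rest ih =>
    intro st h1 h2
    simp only [List.foldl_cons]
    apply ih
    · unfold pvSegStep
      split_ifs
      · exact h1
      · rw [PySem.Dict.keys_modify]; exact PySem.Dict.nodup_keys_insert _ _ _ h1
      · exact h1
    · unfold pvSegStep
      split_ifs
      · exact h2
      · exact h2
      · rw [PySem.Dict.keys_modify]; exact PySem.Dict.nodup_keys_insert _ _ _ h2

lemma pvNodupKeysP2 (ss : List (String × String × List String)) :
    (pvP2 ss).2.1.keys.Nodup ∧ (pvP2 ss).2.2.keys.Nodup := by
  exact pvNodupKeysP2Aux ss ([], PySem.Dict.mk [], PySem.Dict.mk []) (by simp [PySem.Dict.keys]) (by simp [PySem.Dict.keys])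

-- rstrip: the stripped marker does not end in whitespace
lemma pvStripLastNotSpace (l : List Char) (c : Char)
    (h : (PySem.Chars.strip l).getLast? = some c) : PySem.Chars.isspace c = false := by
  simp only [PySem.Chars.strip, PySem.Chars.rstrip, List.getLast?_reverse] at h
  have hh := List.head?_dropWhile_not PySem.Chars.isspace (PySem.Chars.lstrip l).reverse
  rw [h] at hh
  exact hh

-- strip keeps any non-space character alive
lemma pvStripNeNil (cs : List Char) (c : Char) (hc : c ∈ cs)
    (hs : PySem.Chars.isspace c = false) : PySem.Chars.strip cs ≠ [] := by
  intro h
  simp only [PySem.Chars.strip, PySem.Chars.rstrip] at h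
  rw [List.reverse_eq_nil_iff, List.dropWhile_eq_nil_iff] at h
  have hsplit : c ∈ List.takeWhile PySem.Chars.isspace cs ++ List.dropWhile PySem.Chars.isspace cs := by
    rw [List.takeWhile_append_dropWhile]; exact hc
  rcases List.mem_append.mp hsplit with h1 | h2
  · rw [List.mem_takeWhile_imp h1] at hs; cases hs
  · rw [h c (List.mem_reverse.mpr h2)] at hs; cases hs

-- splitOnMax.go with maxsplit exhausted returns the remainder as one piece
lemma pvGo0 (rest : List Char) (fuel : Nat) (cur : List Char) (acc : List (List Char))
    (hf : 1 ≤ fuel) :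
    PySem.Chars.splitOnMax.go [' '] fuel 0 rest cur acc = ((cur.reverse ++ rest) :: acc).reverse := by
  cases fuel with
  | zero => omega
  | succ f =>
    cases rest with
    | nil => simp [PySem.Chars.splitOnMax.go]
    | cons c r => simp [PySem.Chars.splitOnMax.go]

-- splitOnMax.go with maxsplit 1 splits at the first space
lemma pvGoA (a : List Char) : ∀ (fuel : Nat) (cur : List Char) (acc : List (List Char)) (rest : List Char),
    ' ' ∉ a → a.length + rest.length + 2 ≤ fuel →
    PySem.Chars.splitOnMax.go [' '] fuel 1 (a ++ ' ' :: rest) cur acc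
      = (rest :: (cur.reverse ++ a) :: acc).reverse := by
  induction a with
  | nil =>
    intro fuel cur acc rest ha hf
    cases fuel with
    | zero => omega
    | succ f =>
      simp only [List.nil_append]
      rw [PySem.Chars.splitOnMax.go]
      simp only [List.isPrefixOf, beq_self_eq_true, Bool.true_and, if_true]
      norm_num
      rw [pvGo0 rest f [] _ (by simp only [List.length_nil] at hf; omega)]
      simp
  | cons c a ih =>
    intro fuel cur acc rest ha hf
    cases fuel with
    | zero => omega
    | succ f =>
      have hc : c ≠ ' ' := fun e => ha (e ▸ List.mem_cons_self)
      have hcb : ((' ' == c) = false) := beq_eq_false_iff_ne.mpr (Ne.symm hc)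
      rw [List.cons_append, PySem.Chars.splitOnMax.go]
      simp only [List.isPrefixOf, hcb, Bool.false_and]
      norm_num
      rw [ih f (c :: cur) acc rest (fun h => ha (List.mem_cons_of_mem _ h))
        (by simp only [List.length_cons] at hf ⊢; omega)]
      simp

-- marker.split(" ", 1) at the first space
lemma pvSplitAtSpace (a rest : List Char) (ha : ' ' ∉ a) :
    PySem.Chars.splitOnMax (a ++ ' ' :: rest) [' '] 1 = [a, rest] := by
  simp only [PySem.Chars.splitOnMax]
  norm_num
  rw [pvGoA a _ [] [] rest ha (by simp)]
  simp

-- only A–Z change under lower(), so only ' ' lowers to ' '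
lemma pvLowerCharSpace (c : Char) (h : PySem.Chars.lowerChar c = ' ') : c = ' ' := by
  by_cases hu : PySem.Chars.isupper c
  · exfalso
    simp only [PySem.Chars.lowerChar, hu, if_pos] at h
    have h1 := congrArg Char.toNat h
    rw [Char.toNat_ofNat] at h1
    by_cases hv : (c.toNat + 32).isValidChar
    · rw [if_pos hv] at h1
      have hc0 : c.toNat = 0 := by
        have : (' ').toNat = 32 := rfl
        omega
      have hc : c = '\x00' := by
        have := Char.ofNat_toNat c
        rw [hc0] at this
        rw [← this]
      rw [hc] at hu
      exact absurd hu (by decide)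
    · rw [if_neg hv] at h1
      exact absurd h1 (by decide)
  · simpa [PySem.Chars.lowerChar, hu] using h

-- the key after "@@persona " / "@@tone " is never empty
lemma pvKeyNonempty (l : String) (pfxa : List Char) (hsp : ' ' ∉ pfxa)
    (h : PySem.Str.startswith (PySem.Str.lower (PySem.Str.strip l)) (String.ofList (pfxa ++ [' '])) = true) :
    PySem.Str.lower (PySem.Str.strip (pvSplit1Tail (PySem.Str.strip l))) ≠ "" := by
  have hm : (PySem.Str.strip l).toList = PySem.Chars.strip l.toList := by
    simp [PySem.Str.strip]
  set m : List Char := PySem.Chars.strip l.toList with hmdef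
  have hpre : (pfxa ++ [' ']) <+: List.map PySem.Chars.lowerChar m := by
    simp only [PySem.Str.startswith, PySem.Str.lower, hm, String.toList_ofList] at h
    have := (PySem.Chars.startswith_iff _ _).mp h
    simpa [PySem.Chars.lower] using this
  obtain ⟨t, ht⟩ := hpre
  have hlen : pfxa.length + 1 + t.length = m.length := by
    have := congrArg List.length ht
    simp at this
    omega
  have hnm : pfxa.length < m.length := by omega
  have hmn : m[pfxa.length] = ' ' := by
    apply pvLowerCharSpace
    have h2 : (List.map PySem.Chars.lowerChar m)[pfxa.length]'(by simpa using hnm) = ' ' := by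
      rw [List.getElem_of_eq ht.symm,
        List.getElem_append_left (by simp),
        List.getElem_append_right (Nat.le_refl pfxa.length)]
      simp
    simpa using h2
  have hdecomp : m = m.take pfxa.length ++ ' ' :: m.drop (pfxa.length + 1) := by
    conv_lhs => rw [← List.take_append_drop pfxa.length m]
    rw [List.drop_eq_getElem_cons hnm, hmn]
  set a := m.take pfxa.length with hadef
  set rest := m.drop (pfxa.length + 1) with hrestdef
  have hnospace : ' ' ∉ a := by
    intro hc
    have h1 : List.map PySem.Chars.lowerChar a = pfxa := by
      rw [hadef, List.map_take, ← ht]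
      simp
    have : PySem.Chars.lowerChar ' ' ∈ pfxa := h1 ▸ List.mem_map_of_mem hc
    exact hsp (by simpa using this)
  have hsplit : PySem.Chars.splitOnMax m [' '] 1 = [a, rest] := by
    rw [hdecomp]
    exact pvSplitAtSpace a rest hnospace
  have hmne : m ≠ [] := by
    intro e
    rw [e] at hnm
    simp at hnm
  have hrestne : rest ≠ [] := by
    intro e
    have hq : m.getLast? = some ' ' := by
      rw [hdecomp, e, List.getLast?_concat]
    have hsp' := pvStripLastNotSpace l.toList ' ' (by rw [← hmdef]; exact hq)
    exact absurd hsp' (by decide)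
  have hlastmem : rest.getLast hrestne ∈ rest := List.getLast_mem hrestne
  have hlast : PySem.Chars.isspace (rest.getLast hrestne) = false := by
    apply pvStripLastNotSpace l.toList
    rw [← hmdef]
    have hdecomp2 : m = (a ++ [' ']) ++ rest := by rw [hdecomp]; simp
    rw [hdecomp2, List.getLast?_append_of_ne_nil _ hrestne,
      List.getLast?_eq_some_getLast hrestne]
  have hstrip : PySem.Chars.strip rest ≠ [] := pvStripNeNil rest _ hlastmem hlast
  have htail : pvSplit1Tail (PySem.Str.strip l) = String.ofList rest := by
    unfold pvSplit1Tail
    simp only [PySem.Str.splitMax?, hm]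
    have hsep : (" " : String).toList = [' '] := rfl
    rw [hsep]
    simp [PySem.Chars.splitMax?, hsplit]
  rw [htail]
  intro e
  have he := congrArg String.toList e
  simp only [PySem.Str.lower, PySem.Str.strip, String.toList_ofList] at he
  have : PySem.Chars.strip rest = [] := by
    simpa [PySem.Chars.lower] using he
  exact hstrip this

lemma pvP2Concat (ss : List (String × String × List String)) (y : String × String × List String) :
    pvP2 (ss ++ [y]) = pvSegStep (pvP2 ss) y := by
  simp [pvP2]

lemma pvSegStepBase (st : List String × PySem.Dict String (List String) × PySem.Dict String (List String))
    (k : String) (ls : List String) :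
    pvSegStep st ("base", k, ls) = (st.1 ++ ls, st.2.1, st.2.2) := by
  simp [pvSegStep]

lemma pvSegStepPersona (st : List String × PySem.Dict String (List String) × PySem.Dict String (List String))
    (k : String) (ls : List String) :
    pvSegStep st ("persona", k, ls) = (st.1, st.2.1.modify k [] (· ++ ls), st.2.2) := by
  simp only [pvSegStep]
  rw [if_neg (by decide), if_pos (by decide)]

lemma pvSegStepTone (st : List String × PySem.Dict String (List String) × PySem.Dict String (List String))
    (k : String) (ls : List String) :
    pvSegStep st ("tone", k, ls) = (st.1, st.2.1, st.2.2.modify k [] (· ++ ls)) := by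
  simp only [pvSegStep]
  rw [if_neg (by decide), if_neg (by decide)]

lemma pvMain (lines : List String) :
    ∀ done cur sec key, pvRel cur sec key →
      pvDrop (lines.foldl pvStepA (pvJoin3 (pvP2 (done ++ [cur])) sec key))
        = pvP2 (pvPass1 lines cur done) := by
  induction lines with
  | nil =>
    intro done cur sec key _
    rw [pvPass1]
    rfl
  | cons raw rest ih =>
    intro done cur sec key hrel
    rw [pvPass1]
    simp only [List.foldl_cons]
    by_cases h1 : (PySem.Str.strip (pvRstripNl raw) == "@@BASE") = true
    · rw [if_pos h1]
      have hstep : pvStepA (pvJoin3 (pvP2 (done ++ [cur])) sec key) raw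
          = pvJoin3 (pvP2 ((done ++ [cur]) ++ [("base", "", [])])) (some "base") none := by
        simp only [pvStepA, pvJoin3]
        rw [if_pos h1]
        conv_rhs => rw [pvP2Concat, pvSegStepBase]
        simp
      rw [hstep]
      exact ih (done ++ [cur]) ("base", "", []) (some "base") none (Or.inl ⟨rfl, rfl, Or.inr rfl⟩)
    · by_cases h2 : (PySem.Str.startswith (PySem.Str.lower (PySem.Str.strip (pvRstripNl raw))) "@@persona ") = true
      · rw [if_neg h1, if_pos h2]
        have hk : PySem.Str.lower (PySem.Str.strip (pvSplit1Tail (PySem.Str.strip (pvRstripNl raw)))) ≠ "" := by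
          apply pvKeyNonempty (pvRstripNl raw) ("@@persona".toList) (by decide)
          exact h2
        have hnd := (pvNodupKeysP2 (done ++ [cur])).1
        have hstep : pvStepA (pvJoin3 (pvP2 (done ++ [cur])) sec key) raw
            = pvJoin3 (pvP2 ((done ++ [cur])
                ++ [("persona", PySem.Str.lower (PySem.Str.strip (pvSplit1Tail (PySem.Str.strip (pvRstripNl raw)))), [])]))
                (some "persona")
                (some (PySem.Str.lower (PySem.Str.strip (pvSplit1Tail (PySem.Str.strip (pvRstripNl raw)))))) := by
          simp only [pvStepA, pvJoin3]
          rw [if_neg h1, if_pos h2]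
          conv_rhs => rw [pvP2Concat, pvSegStepPersona]
          rw [pvModifyNilSetdefault _ _ hnd]
        rw [hstep]
        exact ih _ _ _ _ (Or.inr (Or.inl ⟨rfl, rfl, rfl, hk⟩))
      · by_cases h3 : (PySem.Str.startswith (PySem.Str.lower (PySem.Str.strip (pvRstripNl raw))) "@@tone ") = true
        · rw [if_neg h1, if_neg h2, if_pos h3]
          have hk : PySem.Str.lower (PySem.Str.strip (pvSplit1Tail (PySem.Str.strip (pvRstripNl raw)))) ≠ "" := by
            apply pvKeyNonempty (pvRstripNl raw) ("@@tone".toList) (by decide)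
            exact h3
          have hnd := (pvNodupKeysP2 (done ++ [cur])).2
          have hstep : pvStepA (pvJoin3 (pvP2 (done ++ [cur])) sec key) raw
              = pvJoin3 (pvP2 ((done ++ [cur])
                  ++ [("tone", PySem.Str.lower (PySem.Str.strip (pvSplit1Tail (PySem.Str.strip (pvRstripNl raw)))), [])]))
                  (some "tone")
                  (some (PySem.Str.lower (PySem.Str.strip (pvSplit1Tail (PySem.Str.strip (pvRstripNl raw)))))) := by
            simp only [pvStepA, pvJoin3]
            rw [if_neg h1, if_neg h2, if_pos h3]
            conv_rhs => rw [pvP2Concat, pvSegStepTone]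
            rw [pvModifyNilSetdefault _ _ hnd]
          rw [hstep]
          exact ih _ _ _ _ (Or.inr (Or.inr ⟨rfl, rfl, rfl, hk⟩))
        · rw [if_neg h1, if_neg h2, if_neg h3]
          obtain ⟨tag, k2, ls⟩ := cur
          rcases hrel with ⟨htag, hkey, hsec⟩ | ⟨htag, hsec, hkey, hne⟩ | ⟨htag, hsec, hkey, hne⟩
          · simp only at htag hkey
            subst htag; subst hkey
            have hstep : pvStepA (pvJoin3 (pvP2 (done ++ [("base", k2, ls)])) sec none) raw
                = pvJoin3 (pvP2 (done ++ [("base", k2, ls ++ [pvRstripNl raw])])) sec none := by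
              simp only [pvStepA, pvJoin3]
              rw [if_neg h1, if_neg h2, if_neg h3]
              conv_lhs => rw [pvP2Concat, pvSegStepBase]
              conv_rhs => rw [pvP2Concat, pvSegStepBase]
              rcases hsec with h | h <;> subst h
              · rw [if_neg (by decide), if_neg (by decide), if_neg (by decide)]
                simp [List.append_assoc]
              · rw [if_pos (by decide)]
                simp [List.append_assoc]
            rw [hstep]
            exact ih done ("base", k2, ls ++ [pvRstripNl raw]) sec none (Or.inl ⟨rfl, rfl, hsec⟩)
          · simp only at htag hsec hkey hne
            subst htag; subst hsec; subst hkey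
            have hcond : ((some "persona" == some "persona" : Bool) && !((some k2 : Option String) == none)
                && !((some k2 : Option String) == some "")) = true := by
              simp [hne]
            have hfun : (fun v : List String => v ++ (ls ++ [pvRstripNl raw]))
                = fun v : List String => (v ++ ls) ++ [pvRstripNl raw] := by
              funext v
              rw [List.append_assoc]
            have hstep : pvStepA (pvJoin3 (pvP2 (done ++ [("persona", k2, ls)])) (some "persona") (some k2)) raw
                = pvJoin3 (pvP2 (done ++ [("persona", k2, ls ++ [pvRstripNl raw])])) (some "persona") (some k2) := by
              simp only [pvStepA, pvJoin3]
              rw [if_neg h1, if_neg h2, if_neg h3]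
              conv_lhs => rw [pvP2Concat, pvSegStepPersona]
              conv_rhs => rw [pvP2Concat, pvSegStepPersona]
              rw [if_neg (by decide), if_pos hcond]
              simp [pvModifyModify, hfun]
            rw [hstep]
            exact ih done ("persona", k2, ls ++ [pvRstripNl raw]) (some "persona") (some k2)
              (Or.inr (Or.inl ⟨rfl, rfl, rfl, hne⟩))
          · simp only at htag hsec hkey hne
            subst htag; subst hsec; subst hkey
            have hcond : ((some "tone" == some "tone" : Bool) && !((some k2 : Option String) == none)
                && !((some k2 : Option String) == some "")) = true := by
              simp [hne]
            have hfun : (fun v : List String => v ++ (ls ++ [pvRstripNl raw]))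
                = fun v : List String => (v ++ ls) ++ [pvRstripNl raw] := by
              funext v
              rw [List.append_assoc]
            have hstep : pvStepA (pvJoin3 (pvP2 (done ++ [("tone", k2, ls)])) (some "tone") (some k2)) raw
                = pvJoin3 (pvP2 (done ++ [("tone", k2, ls ++ [pvRstripNl raw])])) (some "tone") (some k2) := by
              simp only [pvStepA, pvJoin3]
              rw [if_neg h1, if_neg h2, if_neg h3]
              conv_lhs => rw [pvP2Concat, pvSegStepTone]
              conv_rhs => rw [pvP2Concat, pvSegStepTone]
              rw [if_neg (by decide), if_neg (by simp), if_pos hcond]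
              simp [pvModifyModify, hfun]
            rw [hstep]
            exact ih done ("tone", k2, ls ++ [pvRstripNl raw]) (some "tone") (some k2)
              (Or.inr (Or.inr ⟨rfl, rfl, rfl, hne⟩))

-- ===== VERDICT (by name: the statement is the Claim_ definition above) =====
theorem parse_prompt_blocks_py_spec : Claim_equal_parse_prompt_blocks_py := by
  intro text _
  unfold Spec_parse_prompt_blocks_py parse_prompt_blocks_py parse_prompt_blocks_py_alt
  have h := pvMain (PySem.Str.splitlines text) [] ("base", "", []) none none
    (Or.inl ⟨rfl, rfl, Or.inl rfl⟩)
  have e : pvP2 [("base", "", [])] = ([], PySem.Dict.mk [], PySem.Dict.mk []) := by decide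
  rw [List.nil_append, e] at h
  exact congrArg pvFinalize h
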